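-- pv_equiv track=rewrite | github.com/ramchand2009/quickship | core/whatomate.py | _extract_http_status
-- ===== SOURCE A (Python) =====
-- def _extract_http_status(error_message):
--     marker = "HTTP "
--     index = error_message.find(marker)
--     if index == -1:
--         return 0
--     digits = []
--     for char in error_message[index + len(marker) :]:
--         if char.isdigit():
--             digits.append(char)
--         else:
--             break
--     try:
--         return int("".join(digits)) if digits else 0
--     except ValueError:
--         return 0
-- ===== SOURCE B (Python) =====
-- def _extract_http_status(error_message):
--     # Single left-to-right pass with a KMP-style automaton for the marker
--     # "HTTP " (its prefixes have no nontrivial borders, so on a mismatch the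
--     # automaton falls back to state 1 on 'H' and to state 0 otherwise),
--     # followed by an in-place decimal accumulator: no find(), no slicing,
--     # no intermediate list or string.
--     marker = "HTTP "
--     state = 0
--     value = None
--     for ch in error_message:
--         if value is not None:
--             if "0" <= ch <= "9":
--                 value = value * 10 + (ord(ch) - 48)
--             else:
--                 return value
--         elif ch == marker[state]:
--             state += 1
--             if state == 5:
--                 value = 0
--         else:
--             state = 1 if ch == "H" else 0
--     return value if value is not None else 0
-- ===== Notes on version B (the rewrite author's own statement) =====
-- stated objective: alternative
-- what changed: Replaces str.find + slicing + digit-list collection + int() parsing with a single left-to-right pass: a KMP-style finite automaton locates the first 'HTTP ' occurrence and an in-place decimal accumulator reads the following digits, building no intermediate slice, list or string.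
import Mathlib
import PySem

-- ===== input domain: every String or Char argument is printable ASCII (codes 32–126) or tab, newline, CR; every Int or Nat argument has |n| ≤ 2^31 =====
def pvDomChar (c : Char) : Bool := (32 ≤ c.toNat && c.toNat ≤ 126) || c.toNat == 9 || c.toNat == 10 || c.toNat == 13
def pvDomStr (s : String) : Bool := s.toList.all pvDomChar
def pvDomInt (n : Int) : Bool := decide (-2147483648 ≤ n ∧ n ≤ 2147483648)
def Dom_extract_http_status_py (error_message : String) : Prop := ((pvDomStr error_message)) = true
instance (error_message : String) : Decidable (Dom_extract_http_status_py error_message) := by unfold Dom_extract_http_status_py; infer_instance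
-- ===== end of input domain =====

-- B replaces find + slice + digit-list collection + int() by a single pass of a
-- KMP-style automaton for "HTTP " followed by an in-place decimal accumulator
-- (objective: alternative single-pass algorithm, no intermediate slice/list/string).

-- ===== PORT A =====
-- the for-loop over the slice: append while char.isdigit(), break otherwise
def aDigitLoop : List Char → List Char → List Char
  | [], digits => digits
  | c :: rest, digits =>
    if PySem.Chars.strIsdigit [c] then aDigitLoop rest (digits ++ [c]) else digits

-- int("".join(digits)) hand-ported for A's reachable values: digits is a nonempty list of
-- ASCII '0'..'9' characters (guaranteed by the loop above), where int() is exactly this decimal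
-- fold and the ValueError branch is unreachable.
def aIntOfDigits (digits : List Char) : Int :=
  digits.foldl (fun a c => 10 * a + ((c.toNat : Int) - 48)) 0

def extract_http_status_py (error_message : String) : Int :=
  let marker : String := "HTTP "
  let index := PySem.Str.find error_message marker
  if index = -1 then 0
  else
    let digits := aDigitLoop (PySem.Str.slice error_message (some (index + PySem.Str.len marker)) none).toList []
    if digits = [] then 0 else aIntOfDigits digits

-- ===== PORT B =====
-- the for-loop of Source B: state is how many chars of "HTTP " are currently matched
-- (KMP fallback: 1 on 'H', else 0 — the prefixes of "HTTP " have no nontrivial borders);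
-- value is None until the marker is fully matched, then the running decimal value.
-- 'ch == marker[state]' is ported as lookup in the literal marker (state < 5 whenever read).
def bLoop : List Char → Nat → Option Int → Int
  | [], _, value => value.getD 0                    -- 'return value if value is not None else 0'
  | ch :: rest, state, value =>
    match value with
    | some v =>
      if '0' ≤ ch ∧ ch ≤ '9' then bLoop rest state (some (v * 10 + ((ch.toNat : Int) - 48)))
      else v                                        -- early 'return value'
    | none =>
      if ch = "HTTP ".toList.getD state ' ' then
        if state + 1 = 5 then bLoop rest (state + 1) (some 0)
        else bLoop rest (state + 1) none
      else bLoop rest (if ch = 'H' then 1 else 0) none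

def extract_http_status_py_alt (error_message : String) : Int :=
  bLoop error_message.toList 0 none

-- ===== PRECONDITION & SPEC =====
def Spec_extract_http_status_py (error_message : String) (out : Int) : Prop := out = extract_http_status_py_alt error_message
instance (error_message : String) (out : Int) : Decidable (Spec_extract_http_status_py error_message out) := by unfold Spec_extract_http_status_py; infer_instance

-- ===== CLAIM =====
def Claim_equal_extract_http_status_py : Prop := ∀ (error_message : String), Dom_extract_http_status_py error_message → Spec_extract_http_status_py error_message (extract_http_status_py error_message)

-- ===== LEMMAS AND PROOFS =====

theorem mchars : "HTTP ".toList = ['H','T','T','P',' '] := by decide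

-- common reference value: the decimal fold over the leading digit run
def runD (t : List Char) : Int :=
  (t.takeWhile PySem.Chars.isdigit).foldl (fun a c => 10 * a + ((c.toNat : Int) - 48)) 0

-- A's result as a function of the character list
def aCore (u : List Char) : Int :=
  if PySem.Chars.find u "HTTP ".toList = -1 then 0
  else runD (u.drop ((PySem.Chars.find u "HTTP ".toList).toNat + 5))

-- A's collector loop returns acc ++ the leading run of digit characters
theorem aDigitLoop_eq (cs acc : List Char) :
    aDigitLoop cs acc = acc ++ cs.takeWhile PySem.Chars.isdigit := by
  induction cs generalizing acc with
  | nil => simp [aDigitLoop]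
  | cons c rest ih =>
    simp only [aDigitLoop, PySem.Chars.strIsdigit, List.takeWhile_cons]
    by_cases h : PySem.Chars.isdigit c
    · simp [h, ih]
    · simp [h]

-- the tail A scans is drop (find + 5)
theorem tails_eq (s : String) (h : PySem.Chars.find s.toList "HTTP ".toList ≠ -1) :
    (PySem.Str.slice s (some (PySem.Chars.find s.toList "HTTP ".toList + PySem.Str.len "HTTP ")) none).toList
      = s.toList.drop ((PySem.Chars.find s.toList "HTTP ".toList).toNat + 5) := by
  have hnn : 0 ≤ PySem.Chars.find s.toList "HTTP ".toList := by
    have := PySem.Chars.neg_one_le_find s.toList "HTTP ".toList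
    omega
  have hlen : PySem.Str.len "HTTP " = 5 := by decide
  rw [PySem.Str.toList_slice, PySem.Chars.slice_eq_listSlice, hlen,
    PySem.List.slice_from _ (by omega : (0:Int) ≤ PySem.Chars.find s.toList "HTTP ".toList + 5)]
  congr 1
  omega

theorem A_eq_aCore (s : String) : extract_http_status_py s = aCore s.toList := by
  unfold extract_http_status_py aCore
  dsimp only
  rw [show PySem.Str.find s "HTTP " = PySem.Chars.find s.toList "HTTP ".toList by
    simp [PySem.Str.find_eq]]
  by_cases h : PySem.Chars.find s.toList "HTTP ".toList = -1
  · rw [if_pos h, if_pos h]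
  · rw [if_neg h, if_neg h, tails_eq s h, aDigitLoop_eq, List.nil_append]
    by_cases htw :
        (s.toList.drop ((PySem.Chars.find s.toList "HTTP ".toList).toNat + 5)).takeWhile
          PySem.Chars.isdigit = []
    · rw [if_pos htw]; unfold runD; rw [htw]; rfl
    · rw [if_neg htw]; rfl

-- first-occurrence characterisation of find
theorem find_eq_of (s sub : List Char) (n : Nat) (h1 : sub <+: s.drop n)
    (h2 : ∀ i < n, ¬ sub <+: s.drop i) : PySem.Chars.find s sub = (n : Int) := by
  have hinf : sub <:+: s := h1.isInfix.trans (s.drop_suffix n).isInfix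
  have hnn : 0 ≤ PySem.Chars.find s sub := (PySem.Chars.find_nonneg_iff s sub).mpr hinf
  obtain ⟨hp, hmin⟩ := PySem.Chars.find_spec (s := s) (sub := sub) hnn
  rcases lt_trichotomy (PySem.Chars.find s sub).toNat n with h | h | h
  · exact absurd hp (h2 _ h)
  · omega
  · exact absurd h1 (hmin n h)

-- dropping a character that starts no occurrence of the marker
theorem aCore_cons (x : Char) (l : List Char)
    (h : ¬ ("HTTP ".toList <+: x :: l)) : aCore (x :: l) = aCore l := by
  by_cases hl : PySem.Chars.find l "HTTP ".toList = -1
  · have hninf : ¬ "HTTP ".toList <:+: l := (PySem.Chars.find_eq_neg_one_iff l _).mp hl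
    have hcons : PySem.Chars.find (x :: l) "HTTP ".toList = -1 := by
      rw [PySem.Chars.find_eq_neg_one_iff]
      intro hinf
      have hisin := (PySem.Chars.isIn_iff_infix _ _).mpr hinf
      obtain ⟨j, hj⟩ := (PySem.Chars.exists_prefix_drop_iff_isIn _ _).mpr hisin
      cases j with
      | zero => exact h (by simpa using hj)
      | succ j' =>
        have hj' : "HTTP ".toList <+: l.drop j' := by simpa using hj
        exact hninf (hj'.isInfix.trans (l.drop_suffix j').isInfix)
    unfold aCore
    rw [if_pos hcons, if_pos hl]
  · have hnn : 0 ≤ PySem.Chars.find l "HTTP ".toList := by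
      have := PySem.Chars.neg_one_le_find l "HTTP ".toList
      omega
    obtain ⟨hp, hmin⟩ := PySem.Chars.find_spec (s := l) (sub := "HTTP ".toList) hnn
    have hfind : PySem.Chars.find (x :: l) "HTTP ".toList
        = (((PySem.Chars.find l "HTTP ".toList).toNat + 1 : Nat) : Int) := by
      apply find_eq_of
      · simpa using hp
      · intro i hi
        cases i with
        | zero => simpa using h
        | succ i' => simpa using hmin i' (by omega)
    unfold aCore
    have harg : ((((PySem.Chars.find l "HTTP ".toList).toNat + 1 : Nat) : Int).toNat + 5)
        = ((PySem.Chars.find l "HTTP ".toList).toNat + 5) + 1 := by omega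
    rw [hfind, if_neg (by omega), if_neg hl, harg, List.drop_succ_cons]

-- the marker at the head: A's value is the digit fold of the tail
theorem aCore_marker (rest : List Char) : aCore ("HTTP ".toList ++ rest) = runD rest := by
  have hfind : PySem.Chars.find ("HTTP ".toList ++ rest) "HTTP ".toList = (0 : Int) := by
    apply find_eq_of _ _ 0
    · simp
    · intro i hi; omega
  unfold aCore
  rw [hfind, if_neg (by decide)]
  have : (("HTTP ".toList ++ rest).drop ((0 : Int).toNat + 5)) = rest := by
    simp [mchars]
  rw [this]

-- phase 2: once the marker is matched, bLoop is the decimal fold of the digit run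
theorem bLoop_some (cs : List Char) (st : Nat) (v : Int) :
    bLoop cs st (some v)
      = (cs.takeWhile PySem.Chars.isdigit).foldl
          (fun a c => 10 * a + ((c.toNat : Int) - 48)) v := by
  induction cs generalizing v with
  | nil => simp [bLoop]
  | cons c rest ih =>
    by_cases h : '0' ≤ c ∧ c ≤ '9'
    · have hd : PySem.Chars.isdigit c = true := by
        simp [PySem.Chars.isdigit, h.1, h.2]
      have hv : (v * 10 + ((c.toNat : Int) - 48)) = 10 * v + ((c.toNat : Int) - 48) := by ring
      simp only [bLoop, if_pos h, ih, List.takeWhile_cons, hd, if_true, List.foldl_cons, hv]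
    · have hd : PySem.Chars.isdigit c = false := by
        simp [PySem.Chars.isdigit]
        intro h1
        exact not_le.mp (fun h2 => h ⟨h1, h2⟩)
      simp [bLoop, if_neg h, hd]

-- phase 1 invariant: from automaton state k the result is A's result on the
-- pending matched prefix re-fed in front of the remaining input
theorem bLoop_none (cs : List Char) : ∀ k : Nat, k ≤ 4 →
    bLoop cs k none = aCore ("HTTP ".toList.take k ++ cs) := by
  induction cs with
  | nil =>
    intro k hk
    have hfind : PySem.Chars.find ("HTTP ".toList.take k ++ []) "HTTP ".toList = -1 := by
      rw [PySem.Chars.find_eq_neg_one_iff]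
      intro hinf
      have := hinf.length_le
      simp [mchars] at this
      omega
    simp only [bLoop, aCore, hfind]
    rfl
  | cons c rest ih =>
    intro k hk
    interval_cases k
    · -- k = 0
      simp only [bLoop, mchars]
      by_cases hc : c = 'H'
      · rw [if_pos (by simp [hc]), if_neg (by omega), ih 1 (by omega)]
        subst hc; simp [mchars]
      · rw [if_neg (by simp [hc]), if_neg hc, ih 0 (by omega)]
        have h1 : aCore (c :: rest) = aCore rest := by
          apply aCore_cons
          simp [mchars, List.cons_prefix_cons, Ne.symm hc]
        simp [h1]
    · -- k = 1
      simp only [bLoop, mchars]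
      by_cases hc : c = 'T'
      · rw [if_pos (by simp [hc]), if_neg (by omega), ih 2 (by omega)]
        subst hc; simp [mchars]
      · rw [if_neg (by simp [hc])]
        have h1 : aCore ('H' :: c :: rest) = aCore (c :: rest) := by
          apply aCore_cons
          simp [mchars, List.cons_prefix_cons, Ne.symm hc]
        by_cases hH : c = 'H'
        · rw [if_pos hH, ih 1 (by omega)]
          subst hH; simp [mchars, h1]
        · rw [if_neg hH, ih 0 (by omega)]
          have h2 : aCore (c :: rest) = aCore rest := by
            apply aCore_cons
            simp [mchars, List.cons_prefix_cons, Ne.symm hH]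
          simp [mchars, h1, h2]
    · -- k = 2
      simp only [bLoop, mchars]
      by_cases hc : c = 'T'
      · rw [if_pos (by simp [hc]), if_neg (by omega), ih 3 (by omega)]
        subst hc; simp [mchars]
      · rw [if_neg (by simp [hc])]
        have h1 : aCore ('H' :: 'T' :: c :: rest) = aCore ('T' :: c :: rest) := by
          apply aCore_cons
          simp [mchars, List.cons_prefix_cons, Ne.symm hc]
        have h2 : aCore ('T' :: c :: rest) = aCore (c :: rest) := by
          apply aCore_cons
          simp [mchars, List.cons_prefix_cons]
        by_cases hH : c = 'H'
        · rw [if_pos hH, ih 1 (by omega)]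
          subst hH; simp [mchars, h1, h2]
        · rw [if_neg hH, ih 0 (by omega)]
          have h3 : aCore (c :: rest) = aCore rest := by
            apply aCore_cons
            simp [mchars, List.cons_prefix_cons, Ne.symm hH]
          simp [mchars, h1, h2, h3]
    · -- k = 3
      simp only [bLoop, mchars]
      by_cases hc : c = 'P'
      · rw [if_pos (by simp [hc]), if_neg (by omega), ih 4 (by omega)]
        subst hc; simp [mchars]
      · rw [if_neg (by simp [hc])]
        have h1 : aCore ('H' :: 'T' :: 'T' :: c :: rest) = aCore ('T' :: 'T' :: c :: rest) := by
          apply aCore_cons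
          simp [mchars, List.cons_prefix_cons, Ne.symm hc]
        have h2 : aCore ('T' :: 'T' :: c :: rest) = aCore ('T' :: c :: rest) := by
          apply aCore_cons
          simp [mchars, List.cons_prefix_cons]
        have h3 : aCore ('T' :: c :: rest) = aCore (c :: rest) := by
          apply aCore_cons
          simp [mchars, List.cons_prefix_cons]
        by_cases hH : c = 'H'
        · rw [if_pos hH, ih 1 (by omega)]
          subst hH; simp [mchars, h1, h2, h3]
        · rw [if_neg hH, ih 0 (by omega)]
          have h4 : aCore (c :: rest) = aCore rest := by
            apply aCore_cons
            simp [mchars, List.cons_prefix_cons, Ne.symm hH]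
          simp [mchars, h1, h2, h3, h4]
    · -- k = 4
      simp only [bLoop, mchars]
      by_cases hc : c = ' '
      · rw [if_pos (by simp [hc]), if_pos trivial]
        rw [bLoop_some]
        subst hc
        simp only [List.take]
        rw [show (['H','T','T','P'] : List Char) ++ ' ' :: rest = "HTTP ".toList ++ rest by
          simp [mchars]]
        rw [aCore_marker]
        rfl
      · rw [if_neg (by simp [hc])]
        have h1 : aCore ('H' :: 'T' :: 'T' :: 'P' :: c :: rest)
            = aCore ('T' :: 'T' :: 'P' :: c :: rest) := by
          apply aCore_cons
          simp [mchars, List.cons_prefix_cons, Ne.symm hc]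
        have h2 : aCore ('T' :: 'T' :: 'P' :: c :: rest) = aCore ('T' :: 'P' :: c :: rest) := by
          apply aCore_cons
          simp [mchars, List.cons_prefix_cons]
        have h3 : aCore ('T' :: 'P' :: c :: rest) = aCore ('P' :: c :: rest) := by
          apply aCore_cons
          simp [mchars, List.cons_prefix_cons]
        have h4 : aCore ('P' :: c :: rest) = aCore (c :: rest) := by
          apply aCore_cons
          simp [mchars, List.cons_prefix_cons]
        by_cases hH : c = 'H'
        · rw [if_pos hH, ih 1 (by omega)]
          subst hH; simp [mchars, h1, h2, h3, h4]
        · rw [if_neg hH, ih 0 (by omega)]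
          have h5 : aCore (c :: rest) = aCore rest := by
            apply aCore_cons
            simp [mchars, List.cons_prefix_cons, Ne.symm hH]
          simp [mchars, h1, h2, h3, h4, h5]

-- ===== VERDICT =====
theorem extract_http_status_py_spec : Claim_equal_extract_http_status_py := by
  intro s _
  unfold Spec_extract_http_status_py extract_http_status_py_alt
  rw [A_eq_aCore, bLoop_none s.toList 0 (by omega)]
  simp
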